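-- pv_equiv track=rewrite | github.com/beepboop271/computer-science-club | 04-blocking-io/04-activity.py | get_chain_length
-- ===== SOURCE A (Python) =====
-- from typing import Iterable, List, Optional, Tuple
--
-- directions = ((1, 0), (1, 1), (0, 1), (-1, 1), (-1, 0), (-1, -1), (0, -1), (1, -1))
--
-- def get_chain_length(
--     board: List[List[str]],
--     x: int,
--     y: int,
--     mark: str,
--     direction: int,
-- ) -> int:
--     if x < 0 or x > 2 or y < 0 or y > 2:
--         return 0
--     if board[y][x] == mark:
--         return 1 + get_chain_length(
--             board,
--             x+directions[direction][0],
--             y+directions[direction][1],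
--             mark,
--             direction
--         )
--     return 0
-- ===== SOURCE B (Python) =====
-- directions = ((1, 0), (1, 1), (0, 1), (-1, 1), (-1, 0), (-1, -1), (0, -1), (1, -1))
--
-- def get_chain_length(board, x, y, mark, direction):
--     # the first cell decides whether there is a chain at all
--     if not (0 <= x <= 2 and 0 <= y <= 2) or board[y][x] != mark:
--         return 0
--     dx, dy = directions[direction]
--     # Pass 1: pure arithmetic — in-box coordinates of the rest of the ray (no board access).
--     coords = []
--     for i in range(1, 4):
--         cx, cy = x + i * dx, y + i * dy
--         if 0 <= cx <= 2 and 0 <= cy <= 2: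
--             coords.append((cx, cy))
--         else:
--             break
--     # Pass 2: the chain is the first cell plus the matching prefix of the ray's cells.
--     count = 1
--     for cx, cy in coords:
--         if board[cy][cx] != mark:
--             break
--         count += 1
--     return count
-- ===== Notes on version B (the rewrite author's own statement) =====
-- stated objective: alternative
-- what changed: Replaces A's recursion by a first-cell test followed by two staged passes: a pure-arithmetic pass computing the in-box coordinates of the rest of the ray (closed-form x+i*dx, y+i*dy), then a pass counting the matching prefix of the cells at those coordinates.
-- outside the precondition, e.g. on get_chain_length([['X', 'X']], 1, 0, 'X', 4): A returns 2, B returns 2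
import Mathlib
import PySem

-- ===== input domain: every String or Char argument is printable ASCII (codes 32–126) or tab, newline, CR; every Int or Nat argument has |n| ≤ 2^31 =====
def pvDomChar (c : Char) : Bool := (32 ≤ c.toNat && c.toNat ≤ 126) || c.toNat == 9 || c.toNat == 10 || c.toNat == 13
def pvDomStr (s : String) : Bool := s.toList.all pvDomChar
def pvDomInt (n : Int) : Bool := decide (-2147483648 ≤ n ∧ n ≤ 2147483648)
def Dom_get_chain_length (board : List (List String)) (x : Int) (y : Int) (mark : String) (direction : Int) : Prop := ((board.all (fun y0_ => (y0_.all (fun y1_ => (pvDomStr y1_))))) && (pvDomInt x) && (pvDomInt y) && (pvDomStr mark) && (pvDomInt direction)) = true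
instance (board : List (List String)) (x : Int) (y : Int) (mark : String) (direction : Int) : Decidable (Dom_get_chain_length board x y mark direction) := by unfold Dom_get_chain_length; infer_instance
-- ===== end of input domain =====

-- B replaces A's recursion by two staged passes (pure ray-coordinate generation, then matching-prefix count); objective: alternative.


-- ===== PORT A =====
-- the module constant 'directions'
def pvDirections : List (Int × Int) := [(1, 0), (1, 1), (0, 1), (-1, 1), (-1, 0), (-1, -1), (0, -1), (1, -1)]

-- board[y][x]; the .getD "" default is only reachable outside Pre_ (Python raises IndexError there)
def pvCell (board : List (List String)) (y x : Int) : String :=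
  ((PySem.List.pyGet? board y).bind (fun row => PySem.List.pyGet? row x)).getD ""

-- A's recursion, with a fuel counter only to make it total: inside Pre_ the walk visits at
-- most 3 in-range cells before leaving the 0..2 box, so fuel 4 is never exhausted there.
def pvARec (board : List (List String)) (mark : String) (direction : Int) : Nat → Int → Int → Int
  | 0, _, _ => 0
  | fuel + 1, x, y =>
    if x < 0 ∨ x > 2 ∨ y < 0 ∨ y > 2 then 0
    else if pvCell board y x = mark then
      let d := (PySem.List.pyGet? pvDirections direction).getD (0, 0)
      1 + pvARec board mark direction fuel (x + d.1) (y + d.2)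
    else 0

def get_chain_length (board : List (List String)) (x : Int) (y : Int) (mark : String) (direction : Int) : Int :=
  pvARec board mark direction 4 x y

-- ===== PORT B =====
-- Pass 1 of B: the in-box coordinates of the ray, x + i*dx / y + i*dy for i = 0,1,…
-- (the Nat argument is Python's remaining range(4) iterations; i is the loop index).
def pvRayCoords (x y dx dy : Int) : Nat → Nat → List (Int × Int)
  | _, 0 => []
  | i, fuel + 1 =>
    let cx := x + (i : Int) * dx
    let cy := y + (i : Int) * dy
    if 0 ≤ cx ∧ cx ≤ 2 ∧ 0 ≤ cy ∧ cy ≤ 2 then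
      (cx, cy) :: pvRayCoords x y dx dy (i + 1) fuel
    else []

-- Pass 2 of B: running count of the matching prefix of the cells at those coordinates.
def pvCountPrefix (board : List (List String)) (mark : String) : List (Int × Int) → Int → Int
  | [], count => count
  | (cx, cy) :: rest, count =>
    if pvCell board cy cx ≠ mark then count
    else pvCountPrefix board mark rest (count + 1)

def get_chain_length_alt (board : List (List String)) (x : Int) (y : Int) (mark : String) (direction : Int) : Int :=
  if ¬ (0 ≤ x ∧ x ≤ 2 ∧ 0 ≤ y ∧ y ≤ 2) ∨ pvCell board y x ≠ mark then 0
  else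
    let d := (PySem.List.pyGet? pvDirections direction).getD (0, 0)
    pvCountPrefix board mark (pvRayCoords x y d.1 d.2 1 3) 1

-- ===== PRECONDITION & SPEC =====
-- Pre_ admits the inputs where neither walk can raise (IndexError on the board or on the
-- direction tuple): a start outside the 0..2 box (immediate 0), an existing non-matching
-- start cell (immediate 0), or a fully indexable 3×3 board with a valid direction index
-- (the natural domain). It excludes some inputs A still returns on — partially shaped
-- boards or out-of-range directions that a matching walk happens never to touch — because
-- whether they raise depends on the walk itself.
def Pre_get_chain_length (board : List (List String)) (x : Int) (y : Int) (mark : String) (direction : Int) : Prop :=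
  (x < 0 ∨ 2 < x ∨ y < 0 ∨ 2 < y)
  ∨ (((PySem.List.pyGet? board y).bind (fun row => PySem.List.pyGet? row x)).elim false (fun c => c != mark)) = true
  ∨ ((-8 ≤ direction ∧ direction < 8) ∧ 3 ≤ board.length ∧ ∀ row ∈ board.take 3, 3 ≤ row.length)
instance (board : List (List String)) (x : Int) (y : Int) (mark : String) (direction : Int) : Decidable (Pre_get_chain_length board x y mark direction) := by unfold Pre_get_chain_length; infer_instance

def pvWitness_get_chain_length : List (List String) × Int × Int × String × Int :=
  ([["X", "O", "X"], ["O", "X", "O"], ["X", "O", "X"]], 0, 0, "X", 1)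

def Spec_get_chain_length (board : List (List String)) (x : Int) (y : Int) (mark : String) (direction : Int) (out : Int) : Prop := out = get_chain_length_alt board x y mark direction
instance (board : List (List String)) (x : Int) (y : Int) (mark : String) (direction : Int) (out : Int) : Decidable (Spec_get_chain_length board x y mark direction out) := by unfold Spec_get_chain_length; infer_instance

-- ===== CLAIM (what is proved, stated in full; the proofs are below) =====
def Claim_equal_get_chain_length : Prop := ∀ (board : List (List String)) (x : Int) (y : Int) (mark : String) (direction : Int), Dom_get_chain_length board x y mark direction → Pre_get_chain_length board x y mark direction → Spec_get_chain_length board x y mark direction (get_chain_length board x y mark direction)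

-- ===== LEMMAS AND PROOFS =====
-- Shifting the loop index i by one is the same as starting the ray one step further along.
theorem pvRayCoords_shift (x y dx dy : Int) :
    ∀ (fuel i : Nat),
      pvRayCoords x y dx dy (i + 1) fuel
      = pvRayCoords (x + dx) (y + dy) dx dy i fuel := by
  intro fuel
  induction fuel with
  | zero => intro i; simp [pvRayCoords]
  | succ n ih =>
    intro i
    have hx : x + ((i : Int) + 1) * dx = (x + dx) + (i : Int) * dx := by ring
    have hy : y + ((i : Int) + 1) * dy = (y + dy) + (i : Int) * dy := by ring
    simp only [pvRayCoords, Nat.cast_add, Nat.cast_one, hx, hy, ih]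

-- Counting the matching prefix of the generated ray computes count plus A's recursion.
theorem pvB_eq (board : List (List String)) (mark : String) (direction : Int)
    (d : Int × Int) (hd : d = (PySem.List.pyGet? pvDirections direction).getD (0, 0)) :
    ∀ (fuel : Nat) (x y count : Int),
      pvCountPrefix board mark (pvRayCoords x y d.1 d.2 0 fuel) count
      = count + pvARec board mark direction fuel x y := by
  intro fuel
  induction fuel with
  | zero => intro x y count; simp [pvRayCoords, pvCountPrefix, pvARec]
  | succ n ih =>
    intro x y count
    have h0 : pvRayCoords x y d.1 d.2 0 (n + 1)
        = if 0 ≤ x ∧ x ≤ 2 ∧ 0 ≤ y ∧ y ≤ 2 then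
            (x, y) :: pvRayCoords (x + d.1) (y + d.2) d.1 d.2 0 n
          else [] := by
      simp [pvRayCoords, pvRayCoords_shift]
    by_cases hb : 0 ≤ x ∧ x ≤ 2 ∧ 0 ≤ y ∧ y ≤ 2
    · have hA : ¬ (x < 0 ∨ x > 2 ∨ y < 0 ∨ y > 2) := by omega
      rw [h0, if_pos hb]
      by_cases hm : pvCell board y x = mark
      · simp only [pvCountPrefix, hm, ne_eq, not_true_eq_false, if_false]
        rw [ih]
        simp only [pvARec, if_neg hA, if_pos hm, ← hd]
        omega
      · simp [pvCountPrefix, hm, pvARec, hA]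
    · have hA : x < 0 ∨ x > 2 ∨ y < 0 ∨ y > 2 := by omega
      rw [h0, if_neg hb]
      simp [pvCountPrefix, pvARec, hA]

-- ===== VERDICT (by name: the statement is the Claim_ definition above) =====
theorem get_chain_length_spec : Claim_equal_get_chain_length := by
  intro board x y mark direction _ _
  unfold Spec_get_chain_length get_chain_length get_chain_length_alt
  by_cases hb : 0 ≤ x ∧ x ≤ 2 ∧ 0 ≤ y ∧ y ≤ 2
  · by_cases hm : pvCell board y x = mark
    · have hA : ¬ (x < 0 ∨ x > 2 ∨ y < 0 ∨ y > 2) := by omega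
      have hg : ¬ (¬ (0 ≤ x ∧ x ≤ 2 ∧ 0 ≤ y ∧ y ≤ 2) ∨ pvCell board y x ≠ mark) := by
        simp [hb, hm]
      rw [if_neg hg]
      show pvARec board mark direction 4 x y = _
      have hs : ∀ dx dy : Int, pvRayCoords x y dx dy 1 3
          = pvRayCoords (x + dx) (y + dy) dx dy 0 3 :=
        fun dx dy => pvRayCoords_shift x y dx dy 3 0
      conv_lhs => rw [pvARec]
      rw [if_neg hA, if_pos hm]
      simp only [hs]
      rw [pvB_eq board mark direction _ rfl]
    · have hg : (¬ (0 ≤ x ∧ x ≤ 2 ∧ 0 ≤ y ∧ y ≤ 2) ∨ pvCell board y x ≠ mark) := by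
        simp [hm]
      have hA : ¬ (x < 0 ∨ x > 2 ∨ y < 0 ∨ y > 2) := by omega
      rw [if_pos hg]
      show pvARec board mark direction 4 x y = 0
      simp [pvARec, hA, hm]
  · have hg : (¬ (0 ≤ x ∧ x ≤ 2 ∧ 0 ≤ y ∧ y ≤ 2) ∨ pvCell board y x ≠ mark) := Or.inl hb
    have hA : x < 0 ∨ x > 2 ∨ y < 0 ∨ y > 2 := by omega
    rw [if_pos hg]
    show pvARec board mark direction 4 x y = 0
    simp [pvARec, hA]
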